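-- pv_equiv track=rewrite | github.com/MrBrantCode/unitest_baseline | mut_generate/mist_train_taco/taco_8545/solution.py | is_hat_sequence_consistent
-- ===== SOURCE A (Python) =====
-- def is_hat_sequence_consistent(N, a):
--     a.sort()
--     min_val = a[0]
--     max_val = a[N - 1]
--
--     if max_val - min_val > 1:
--         return 'No'
--     elif max_val == min_val:
--         if max_val <= N // 2 or max_val == N - 1:
--             return 'Yes'
--         else:
--             return 'No'
--     else:
--         count_min = 0
--         count_max = N
--         for i in range(N):
--             if a[i] < max_val:
--                 count_min += 1
--                 count_max -= 1
--             else: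
--                 break
--         if count_min < max_val <= count_min + count_max // 2:
--             return 'Yes'
--         else:
--             return 'No'
-- ===== SOURCE B (Python) =====
-- def _first_ge(a, x, lo, hi):
--     # least index i in [lo, hi] with all a[j] < x for j < i (binary search; a sorted)
--     while lo < hi:
--         mid = (lo + hi) // 2
--         if a[mid] < x:
--             lo = mid + 1
--         else:
--             hi = mid
--     return lo
--
-- def is_hat_sequence_consistent(N, a):
--     a.sort()
--     mn, mx = a[0], a[N - 1]
--     if mx == mn:
--         return 'Yes' if mx <= N // 2 or mx == N - 1 else 'No'
--     if mx - mn > 1: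
--         return 'No'
--     cmin = _first_ge(a, mx, 0, N)
--     return 'Yes' if cmin < mx <= cmin + (N - cmin) // 2 else 'No'
-- ===== Notes on version B (the rewrite author's own statement) =====
-- stated objective: alternative
-- what changed: B keeps the sort and the two guard branches but replaces A's linear scan-with-break over range(N) by a hand-rolled binary search (first index with a[i] >= max_val) on the sorted array; B performs the same in-place sort of the argument as A.
import Mathlib
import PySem

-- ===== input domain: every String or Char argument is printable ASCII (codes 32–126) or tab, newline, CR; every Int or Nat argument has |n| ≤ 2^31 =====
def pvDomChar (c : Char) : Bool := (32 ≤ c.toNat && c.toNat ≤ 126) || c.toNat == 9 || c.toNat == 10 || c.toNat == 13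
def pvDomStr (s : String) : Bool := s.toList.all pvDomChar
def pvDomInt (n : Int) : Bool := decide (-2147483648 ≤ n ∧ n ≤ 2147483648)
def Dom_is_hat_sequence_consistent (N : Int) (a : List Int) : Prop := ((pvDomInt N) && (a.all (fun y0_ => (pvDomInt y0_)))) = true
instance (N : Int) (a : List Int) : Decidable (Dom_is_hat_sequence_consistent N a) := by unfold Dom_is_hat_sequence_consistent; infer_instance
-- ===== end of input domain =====

-- B replaces A's linear scan-with-break by a binary search for the first element ≥ max_val
-- on the sorted array; same in-place sort of the argument as A, return values proved equal.

-- ===== PORT A =====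
-- the for-i-in-range(N) loop with break, counting leading elements below max_val
def aCountLoop (s : List Int) (mx : Int) : List Int → Int × Int → Int × Int
  | [], st => st
  | i :: rest, (cmin, cmax) =>
    if PySem.List.pyGetD s i 0 < mx then aCountLoop s mx rest (cmin + 1, cmax - 1)
    else (cmin, cmax)

def is_hat_sequence_consistent (N : Int) (a : List Int) : String :=
  let s := PySem.List.sorted a (fun x => x) false
  let min_val := PySem.List.pyGetD s 0 0          -- a[0]; in range under Pre_
  let max_val := PySem.List.pyGetD s (N - 1) 0    -- a[N-1]; in range under Pre_
  if max_val - min_val > 1 then "No"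
  else if max_val = min_val then
    if max_val ≤ PySem.Int.floordiv N 2 ∨ max_val = N - 1 then "Yes" else "No"
  else
    let st := aCountLoop s max_val (PySem.List.pyRange 0 N 1) (0, N)
    if st.1 < max_val ∧ max_val ≤ st.1 + PySem.Int.floordiv st.2 2 then "Yes" else "No"

-- ===== PORT B =====
-- _first_ge: binary search for the least index in [lo, hi] whose element is ≥ x
def bFirstGE (s : List Int) (x lo hi : Int) : Int :=
  if h : lo < hi then
    let mid := PySem.Int.floordiv (lo + hi) 2
    if PySem.List.pyGetD s mid 0 < x then bFirstGE s x (mid + 1) hi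
    else bFirstGE s x lo mid
  else lo
termination_by (hi - lo).toNat
decreasing_by
  · have hlo1 : lo ≤ PySem.Int.floordiv (lo + hi) 2 :=
      (PySem.Int.le_floordiv_iff_mul_le (by norm_num)).mpr (by omega)
    omega
  · have h2 : PySem.Int.floordiv (lo + hi) 2 < hi :=
      (PySem.Int.floordiv_lt_iff_lt_mul (by norm_num)).mpr (by omega)
    have h1 : lo ≤ PySem.Int.floordiv (lo + hi) 2 :=
      (PySem.Int.le_floordiv_iff_mul_le (by norm_num)).mpr (by omega)
    omega

def is_hat_sequence_consistent_alt (N : Int) (a : List Int) : String :=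
  let b := PySem.List.sorted a (fun x => x) false
  let mn := PySem.List.pyGetD b 0 0
  let mx := PySem.List.pyGetD b (N - 1) 0
  if mx = mn then
    if mx ≤ PySem.Int.floordiv N 2 ∨ mx = N - 1 then "Yes" else "No"
  else if mx - mn > 1 then "No"
  else
    let cmin := bFirstGE b mx 0 N
    if cmin < mx ∧ mx ≤ cmin + PySem.Int.floordiv (N - cmin) 2 then "Yes" else "No"

-- ===== PRECONDITION & SPEC =====
-- exactly the inputs on which A returns: a[N-1] must not raise IndexError
def Pre_is_hat_sequence_consistent (N : Int) (a : List Int) : Prop :=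
  PySem.Raise.InRange a.length (N - 1)
instance (N : Int) (a : List Int) : Decidable (Pre_is_hat_sequence_consistent N a) := by
  unfold Pre_is_hat_sequence_consistent; infer_instance

def pvWitness_is_hat_sequence_consistent : Int × List Int := (3, [1, 1, 2])

def Spec_is_hat_sequence_consistent (N : Int) (a : List Int) (out : String) : Prop := out = is_hat_sequence_consistent_alt N a
instance (N : Int) (a : List Int) (out : String) : Decidable (Spec_is_hat_sequence_consistent N a out) := by unfold Spec_is_hat_sequence_consistent; infer_instance

-- ===== CLAIM (what is proved, stated in full; the proofs are below) =====
def Claim_equal_is_hat_sequence_consistent : Prop := ∀ (N : Int) (a : List Int), Dom_is_hat_sequence_consistent N a → Pre_is_hat_sequence_consistent N a → Spec_is_hat_sequence_consistent N a (is_hat_sequence_consistent N a)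

-- ===== LEMMAS AND PROOFS =====

-- A's loop over range(k, n) equals: count the leading run (takeWhile) of the rest of s.take n.
lemma aCountLoop_spec (s : List Int) (mx : Int) (n : Nat) (hn : n ≤ s.length) :
    ∀ (fuel k : Nat) (c d : Int), n - k ≤ fuel → k ≤ n →
      aCountLoop s mx (PySem.List.pyRange (k : Int) (n : Int) 1) (c, d)
        = (c + ((((s.take n).drop k).takeWhile (fun y => decide (y < mx))).length : Int),
           d - ((((s.take n).drop k).takeWhile (fun y => decide (y < mx))).length : Int)) := by
  intro fuel
  induction fuel with
  | zero =>
    intro k c d hf hk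
    have hk' : k = n := by omega
    subst hk'
    rw [PySem.List.pyRange_one_eq_nil (by omega)]
    simp [aCountLoop]
  | succ m ih =>
    intro k c d hf hk
    rcases Nat.eq_or_lt_of_le hk with heq | hlt
    · subst heq
      rw [PySem.List.pyRange_one_eq_nil (by omega)]
      simp [aCountLoop]
    · have hls : k < s.length := by omega
      have hget : PySem.List.pyGetD s (k : Int) 0 = s[k]'hls := by
        rw [PySem.List.pyGetD_natCast]
        exact List.getD_eq_getElem s 0 hls
      have hkt : k < (s.take n).length := by simp; omega
      have hdrop : (s.take n).drop k = (s.take n)[k]'hkt :: (s.take n).drop (k + 1) :=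
        List.drop_eq_getElem_cons hkt
      have hidx : (s.take n)[k]'hkt = s[k]'hls := List.getElem_take
      rw [PySem.List.pyRange_one_cons (by exact_mod_cast hlt)]
      unfold aCountLoop
      rw [hget]
      by_cases hx : s[k]'hls < mx
      · rw [if_pos hx]
        have : ((k : Int) + 1) = ((k + 1 : Nat) : Int) := by push_cast; ring
        rw [this, ih (k + 1) (c + 1) (d - 1) (by omega) (by omega)]
        rw [hdrop, hidx, List.takeWhile_cons_of_pos (by simpa using hx)]
        simp only [List.length_cons, Prod.mk.injEq]
        constructor <;> (push_cast; ring)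
      · rw [if_neg hx, hdrop, hidx, List.takeWhile_cons_of_neg (by simpa using hx)]
        simp

-- the first (takeWhile p u).length elements of u all satisfy p …
lemma takeWhile_prefix_prop (p : Int → Bool) :
    ∀ (u : List Int) (j : Nat), j < (u.takeWhile p).length →
      ∃ h : j < u.length, p (u[j]'h) = true := by
  intro u
  induction u with
  | nil => intro j hj; simp at hj
  | cons x t ih =>
    intro j hj
    by_cases hx : p x
    · rw [List.takeWhile_cons_of_pos hx] at hj
      cases j with
      | zero => exact ⟨by simp, hx⟩
      | succ i =>
        obtain ⟨h, hp⟩ := ih i (by simpa using hj)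
        exact ⟨by simpa using h, by simpa using hp⟩
    · rw [List.takeWhile_cons_of_neg hx] at hj
      simp at hj

-- … and the next element (if any) does not
lemma takeWhile_stop_prop (p : Int → Bool) :
    ∀ (u : List Int), (u.takeWhile p).length < u.length →
      p (u.getD (u.takeWhile p).length 0) = false := by
  intro u
  induction u with
  | nil => intro h; simp at h
  | cons x t ih =>
    intro h
    by_cases hx : p x
    · rw [List.takeWhile_cons_of_pos hx] at h ⊢
      simpa using ih (by simpa using h)
    · rw [List.takeWhile_cons_of_neg hx] at h ⊢
      simpa using hx

-- B's binary search: its result is bracketed, everything strictly before it is < x,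
-- and (if it is not hi) its own element is ≥ x — on a sorted list
lemma bFirstGE_spec (s : List Int) (x : Int) (hpw : s.Pairwise (· ≤ ·)) :
    ∀ (fuel : Nat) (lo hi : Int), (hi - lo).toNat ≤ fuel → 0 ≤ lo → lo ≤ hi →
      hi ≤ (s.length : Int) →
      lo ≤ bFirstGE s x lo hi ∧ bFirstGE s x lo hi ≤ hi ∧
      (∀ (j : Nat) (hj : j < s.length), lo ≤ (j : Int) → (j : Int) < bFirstGE s x lo hi →
        s[j] < x) ∧
      (bFirstGE s x lo hi < hi → ∀ (hr : (bFirstGE s x lo hi).toNat < s.length),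
        ¬ s[(bFirstGE s x lo hi).toNat] < x) := by
  have hmono : ∀ (i j : Nat) (hi' : i < s.length) (hj' : j < s.length), i ≤ j →
      s[i] ≤ s[j] := by
    intro i j hi' hj' hij
    rcases Nat.eq_or_lt_of_le hij with rfl | hlt
    · exact le_refl _
    · exact (List.pairwise_iff_getElem.mp hpw) i j hi' hj' hlt
  intro fuel
  induction fuel with
  | zero =>
    intro lo hi hf h0 hlh hhi
    have : hi = lo := by omega
    subst this
    rw [bFirstGE, dif_neg (by omega)]
    refine ⟨le_refl _, le_refl _, ?_, by omega⟩
    intro j hj h1 h2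
    omega
  | succ m ih =>
    intro lo hi hf h0 hlh hhi
    by_cases hlt : lo < hi
    · have hm1 : lo ≤ PySem.Int.floordiv (lo + hi) 2 :=
        (PySem.Int.le_floordiv_iff_mul_le (by norm_num)).mpr (by omega)
      have hm2 : PySem.Int.floordiv (lo + hi) 2 < hi :=
        (PySem.Int.floordiv_lt_iff_lt_mul (by norm_num)).mpr (by omega)
      set mid := PySem.Int.floordiv (lo + hi) 2 with hmid
      have hmidlen : mid.toNat < s.length := by omega
      have hmidcast : mid = ((mid.toNat : Nat) : Int) := by omega
      have hget : PySem.List.pyGetD s mid 0 = s[mid.toNat]'hmidlen := by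
        conv_lhs => rw [hmidcast]
        rw [PySem.List.pyGetD_natCast]
        exact List.getD_eq_getElem s 0 hmidlen
      have hunf : bFirstGE s x lo hi =
          if PySem.List.pyGetD s mid 0 < x then bFirstGE s x (mid + 1) hi
          else bFirstGE s x lo mid := by
        rw [bFirstGE, dif_pos hlt]
      by_cases hx : s[mid.toNat]'hmidlen < x
      · have hxg : PySem.List.pyGetD s mid 0 < x := by rw [hget]; exact hx
        rw [if_pos hxg] at hunf
        rw [hunf]
        obtain ⟨i1, i2, i3, i4⟩ := ih (mid + 1) hi (by omega) (by omega) (by omega) hhi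
        refine ⟨by omega, i2, ?_, i4⟩
        intro j hj hjlo hjr
        by_cases hjm : mid + 1 ≤ (j : Int)
        · exact i3 j hj hjm hjr
        · have : j ≤ mid.toNat := by omega
          exact lt_of_le_of_lt (hmono j mid.toNat hj hmidlen this) hx
      · have hxg : ¬ PySem.List.pyGetD s mid 0 < x := by rw [hget]; exact hx
        rw [if_neg hxg] at hunf
        rw [hunf]
        obtain ⟨i1, i2, i3, i4⟩ := ih lo mid (by omega) h0 (by omega) (by omega)
        refine ⟨i1, by omega, i3, ?_⟩
        intro hrhi hr
        by_cases hrm : bFirstGE s x lo mid < mid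
        · exact i4 hrm hr
        · have heq : bFirstGE s x lo mid = mid := by omega
          intro hcon
          exact hx (by simpa [heq] using hcon)
    · rw [bFirstGE, dif_neg hlt]
      refine ⟨le_refl _, hlh, ?_, by omega⟩
      intro j hj h1 h2
      omega

theorem is_hat_sequence_consistent_spec_aux :
    ∀ (N : Int) (a : List Int), Pre_is_hat_sequence_consistent N a →
      is_hat_sequence_consistent N a = is_hat_sequence_consistent_alt N a := by
  intro N a hpre
  have hrange : -(a.length : Int) ≤ N - 1 ∧ N - 1 < (a.length : Int) := by
    have := hpre
    unfold Pre_is_hat_sequence_consistent PySem.Raise.InRange at this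
    omega
  set s := PySem.List.sorted a (fun x => x) false with hs
  have hpw : s.Pairwise (fun u v => (fun x => x) u ≤ (fun x => x) v) :=
    PySem.List.sorted_pairwise a (fun x => x)
  have hpw' : s.Pairwise (· ≤ ·) := hpw
  have hslen : s.length = a.length := (PySem.List.sorted_perm a (fun x => x) false).length_eq
  unfold is_hat_sequence_consistent is_hat_sequence_consistent_alt
  simp only [← hs]
  set mn := PySem.List.pyGetD s 0 0 with hmn
  set mx := PySem.List.pyGetD s (N - 1) 0 with hmx
  by_cases hgap : mx - mn > 1
  · rw [if_pos hgap, if_neg (by omega), if_pos hgap]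
  · rw [if_neg hgap]
    by_cases heq : mx = mn
    · rw [if_pos heq, if_pos heq]
    · rw [if_neg heq, if_neg heq, if_neg hgap]
      -- the counting branch
      by_cases hNpos : 1 ≤ N
      · -- N ≥ 1: A's scan and B's binary search both find the first index with s[i] ≥ mx
        have hNlen : N ≤ (s.length : Int) := by omega
        set n := N.toNat with hn
        have hncast : ((n : Nat) : Int) = N := by omega
        have hnlen : n ≤ s.length := by omega
        have hloop := aCountLoop_spec s mx n hnlen n 0 0 N (by omega) (by omega)
        rw [show ((0 : Nat) : Int) = 0 from rfl, hncast] at hloop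
        rw [hloop]
        set T := (((s.take n).drop 0).takeWhile (fun y => decide (y < mx))).length with hT
        have hTlen : T ≤ n := by
          have h1 : T ≤ ((s.take n).drop 0).length := by
            rw [hT]; exact (List.takeWhile_prefix _).length_le
          simp at h1; omega
        obtain ⟨b1, b2, b3, b4⟩ :=
          bFirstGE_spec s mx hpw' (N - 0).toNat 0 N (by omega) (by omega) (by omega) hNlen
        set r := bFirstGE s mx 0 N with hr
        have hrT : r = (T : Int) := by
          rcases lt_trichotomy r (T : Int) with hlt | heq' | hgt
          · exfalso
            have hr0 : 0 ≤ r := b1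
            have hrn : r.toNat < T := by omega
            obtain ⟨hju, hp⟩ := takeWhile_prefix_prop (fun y => decide (y < mx))
              ((s.take n).drop 0) r.toNat (by omega)
            have hjs : r.toNat < s.length := by
              have : ((s.take n).drop 0).length ≤ n := by simp
              omega
            have hval : ((s.take n).drop 0)[r.toNat]'hju = s[r.toNat]'hjs := by
              simp [List.getElem_take]
            rw [hval] at hp
            have : s[r.toNat]'hjs < mx := by simpa using hp
            exact (b4 (by omega) hjs) this
          · exact heq'
          · exfalso
            have hTn : T < n := by omega
            have hTseg : T < ((s.take n).drop 0).length := by simp; omega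
            have hstop := takeWhile_stop_prop (fun y => decide (y < mx)) ((s.take n).drop 0)
              (by rw [← hT]; exact hTseg)
            have hTs : T < s.length := by omega
            have hval : ((s.take n).drop 0).getD T 0 = s[T]'hTs := by
              rw [List.getD_eq_getElem _ _ hTseg]
              simp [List.getElem_take]
            rw [← hT, hval] at hstop
            have hlt' : s[T]'hTs < mx := b3 T hTs (by omega) (by omega)
            simp [hlt'] at hstop
        rw [hrT]
        norm_num
      · -- N ≤ 0: the scan range is empty and the binary search returns lo = 0
        rw [PySem.List.pyRange_one_eq_nil (by omega)]
        rw [bFirstGE, dif_neg (by omega)]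
        simp [aCountLoop]

-- ===== VERDICT (by name: the statement is the Claim_ definition above) =====
theorem is_hat_sequence_consistent_spec : Claim_equal_is_hat_sequence_consistent := by
  intro N a _ hpre
  unfold Spec_is_hat_sequence_consistent
  exact is_hat_sequence_consistent_spec_aux N a hpre
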